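-- pv_equiv track=rewrite | github.com/vivekpise-ml/explainable-resume-matcher-nlp | src/backup-earlier-src-files-if-any/matcher_training-multi-hop-skill_graph/matcher_training.py | get_related_multi_hop
-- ===== SOURCE A (Python) =====
-- def normalize(s):
--     return s.lower().strip()
--
-- def get_related_multi_hop(skill, skill_graph, max_depth=2):
--     skill = normalize(skill)
--
--     visited = set()
--     queue = [(skill, 0)]
--     hop_dict = {}
--
--     while queue:
--         node, depth = queue.pop(0)
--
--         if depth >= max_depth:
--             continue
--
--         for nei in skill_graph.get(node, []):
--             nei_norm = normalize(nei)
--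
--             if nei_norm not in visited:
--                 visited.add(nei_norm)
--                 hop_dict[nei_norm] = depth + 1
--                 queue.append((nei_norm, depth + 1))
--
--     return hop_dict
-- ===== SOURCE B (Python) =====
-- def normalize(s):
--     return s.lower().strip()
--
-- def get_related_multi_hop(skill, skill_graph, max_depth=2):
--     # Pre-normalize every adjacency list once, then generate the hop levels as a
--     # pure recursion returning a flat (node, hop) list; the dict is built once at
--     # the end.  No mutable visited/hop_dict state is threaded through the search.
--     norm_graph = {k: [normalize(v) for v in vs] for k, vs in skill_graph.items()}
--
--     def levels(frontier, seen, depth):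
--         if depth > max_depth or not frontier:
--             return []
--         new = []
--         for node in frontier:
--             for x in norm_graph.get(node, []):
--                 if x not in seen and x not in new:
--                     new.append(x)
--         return [(x, depth) for x in new] + levels(new, seen | set(new), depth + 1)
--
--     return dict(levels([normalize(skill)], set(), 1))
-- ===== Notes on version B (the rewrite author's own statement) =====
-- stated objective: alternative
-- what changed: Replaced the imperative (node,depth)-queue with mutable visited/hop_dict state by a pure recursion that pre-normalizes the adjacency lists once, generates each hop level as a deduplicated list, concatenates the (node,hop) pairs of all levels, and builds the dict once at the end.
import Mathlib
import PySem

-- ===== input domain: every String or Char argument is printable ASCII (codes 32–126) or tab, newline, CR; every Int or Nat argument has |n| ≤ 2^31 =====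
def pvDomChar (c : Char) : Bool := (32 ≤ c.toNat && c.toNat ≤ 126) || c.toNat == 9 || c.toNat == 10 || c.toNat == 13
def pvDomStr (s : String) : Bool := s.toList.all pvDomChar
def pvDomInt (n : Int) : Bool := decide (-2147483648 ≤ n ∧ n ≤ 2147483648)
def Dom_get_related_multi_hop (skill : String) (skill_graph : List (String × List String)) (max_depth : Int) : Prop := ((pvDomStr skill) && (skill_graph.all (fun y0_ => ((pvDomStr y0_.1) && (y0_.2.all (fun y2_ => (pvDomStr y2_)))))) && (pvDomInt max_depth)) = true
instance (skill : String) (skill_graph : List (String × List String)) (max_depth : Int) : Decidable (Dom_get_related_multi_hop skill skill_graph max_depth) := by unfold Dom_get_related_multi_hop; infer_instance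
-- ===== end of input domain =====

-- B replaces A's imperative (node, depth)-queue with mutable visited/hop_dict state by a pure
-- recursion over hop levels on a pre-normalized graph, building the dict once at the end;
-- return values are proved equal (dict insertion order included) on all inputs.

-- ===== PORT A =====
-- normalize(s) = s.lower().strip()  (shared by both Pythons)
def pvNorm (s : String) : String := PySem.Str.strip (PySem.Str.lower s)

-- skill_graph.get(node, [])
def pvGet (sg : List (String × List String)) (node : String) : List String :=
  PySem.Dict.getD (PySem.Dict.mk sg) node []

-- body of A's inner `for nei in skill_graph.get(node, [])` loop, state (visited, hop_dict, queue)
def pvStepA (d : Int) (st : PySem.Set String × PySem.Dict String Int × List (String × Int))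
    (nei : String) : PySem.Set String × PySem.Dict String Int × List (String × Int) :=
  if st.1.contains (pvNorm nei) then st
  else (st.1.add (pvNorm nei), st.2.1.insert (pvNorm nei) (d + 1), st.2.2 ++ [(pvNorm nei, d + 1)])

-- termination bookkeeping for A's while loop: universe of normalized neighbours, unvisited count
def pvU (sg : List (String × List String)) : List String :=
  (sg.flatMap (fun p => p.2)).map pvNorm

def pvUnvis (sg : List (String × List String)) (v : PySem.Set String) : Nat :=
  ((pvU sg).filter (fun x => !(v.contains x))).length

theorem pvFilter_length_lt {α : Type} (p q : α → Bool) (h : ∀ x, q x = true → p x = true)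
    (l : List α) (n : α) (hn : n ∈ l) (hp : p n = true) (hq : q n = false) :
    (l.filter q).length < (l.filter p).length := by
  induction l with
  | nil => cases hn
  | cons a t ih =>
    rcases List.mem_cons.mp hn with rfl | ht
    · have hle : (t.filter q).length ≤ (t.filter p).length :=
        (List.monotone_filter_right t h).length_le
      simp [hp, hq]
      omega
    · by_cases hqa : q a = true
      · simp [hqa, h a hqa]
        exact ih ht
      · have := ih ht
        by_cases hpa : p a = true <;> simp [hqa, hpa] <;> omega

theorem pvGet_subset (sg : List (String × List String)) (node : String) :
    ∀ x ∈ pvGet sg node, x ∈ sg.flatMap (fun p => p.2) := by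
  intro x hx
  unfold pvGet PySem.Dict.getD PySem.Dict.get? at hx
  rcases hfind : List.find? (fun p => p.1 == node) (PySem.Dict.mk sg).items with _ | ⟨pr⟩
  · simp [hfind] at hx
  · simp [hfind] at hx
    have hmem : pr ∈ sg := List.mem_of_find?_eq_some hfind
    exact List.mem_flatMap.mpr ⟨pr, hmem, hx⟩

theorem pvUnvis_add_lt (sg : List (String × List String)) (v : PySem.Set String) (n : String)
    (hn : n ∈ pvU sg) (hnv : v.contains n = false) :
    pvUnvis sg (v.add n) < pvUnvis sg v := by
  unfold pvUnvis
  have hadd : v.add n = v ++ [n] := by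
    unfold PySem.Set.add
    rw [hnv]
    simp
  rw [hadd]
  refine pvFilter_length_lt _ _ ?_ _ n hn ?_ ?_
  · intro x hx
    simp only [PySem.Set.contains, Bool.not_eq_true', List.contains_append,
      Bool.or_eq_false_iff] at hx
    simp only [PySem.Set.contains, Bool.not_eq_true']
    exact hx.1
  · simp only [PySem.Set.contains, Bool.not_eq_true']
    exact hnv
  · simp only [PySem.Set.contains, List.contains_append]
    simp

theorem pvStepA_skip (d : Int) (v : PySem.Set String) (h : PySem.Dict String Int)
    (q : List (String × Int)) (x : String) (hc : v.contains (pvNorm x) = true) :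
    pvStepA d (v, h, q) x = (v, h, q) := by
  have hm : pvNorm x ∈ v := by simpa [PySem.Set.contains] using hc
  simp [pvStepA, hm]

theorem pvStepA_new (d : Int) (v : PySem.Set String) (h : PySem.Dict String Int)
    (q : List (String × Int)) (x : String) (hc : v.contains (pvNorm x) = false) :
    pvStepA d (v, h, q) x
      = (v.add (pvNorm x), h.insert (pvNorm x) (d + 1), q ++ [(pvNorm x, d + 1)]) := by
  have hm : pvNorm x ∉ v := by simpa [PySem.Set.contains] using hc
  simp [pvStepA, hm]

theorem pvFoldA_measure (sg : List (String × List String)) (d : Int) :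
    ∀ (neis : List String), (∀ x ∈ neis, x ∈ sg.flatMap (fun p => p.2)) →
    ∀ (v : PySem.Set String) (h : PySem.Dict String Int) (q : List (String × Int)),
      2 * pvUnvis sg (neis.foldl (pvStepA d) (v, h, q)).1 +
        ((neis.foldl (pvStepA d) (v, h, q)).2.2).length ≤ 2 * pvUnvis sg v + q.length := by
  intro neis
  induction neis with
  | nil => intro _ v h q; simp
  | cons x t ih =>
    intro hsub v h q
    have hx : x ∈ sg.flatMap (fun p => p.2) := hsub x (List.mem_cons_self ..)
    have ht : ∀ y ∈ t, y ∈ sg.flatMap (fun p => p.2) := fun y hy => hsub y (List.mem_cons_of_mem _ hy)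
    simp only [List.foldl_cons]
    rcases hc : (v.contains (pvNorm x)) with _ | _
    · have hmem : pvNorm x ∈ pvU sg := List.mem_map.mpr ⟨x, hx, rfl⟩
      have hlt := pvUnvis_add_lt sg v (pvNorm x) hmem hc
      rw [pvStepA_new d v h q x hc]
      have := ih ht (v.add (pvNorm x)) (h.insert (pvNorm x) (d + 1)) (q ++ [(pvNorm x, d + 1)])
      simp only [List.length_append, List.length_cons, List.length_nil] at this
      omega
    · rw [pvStepA_skip d v h q x hc]
      exact ih ht v h q

-- A's while loop over queue of (node, depth)
def pvLoopA (sg : List (String × List String)) (md : Int)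
    (v : PySem.Set String) (q : List (String × Int)) (h : PySem.Dict String Int) :
    PySem.Dict String Int :=
  match q with
  | [] => h
  | (node, depth) :: rest =>
    if md ≤ depth then pvLoopA sg md v rest h
    else
      let st := (pvGet sg node).foldl (pvStepA depth) (v, h, rest)
      pvLoopA sg md st.1 st.2.2 st.2.1
termination_by 2 * pvUnvis sg v + q.length
decreasing_by
  · simp only [List.length_cons]; omega
  · have := pvFoldA_measure sg depth (pvGet sg node) (pvGet_subset sg node) v h rest
    simp only [List.length_cons]
    omega

def get_related_multi_hop (skill : String) (skill_graph : List (String × List String))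
    (max_depth : Int) : List (String × Int) :=
  (pvLoopA skill_graph max_depth PySem.Set.empty [(pvNorm skill, 0)] (PySem.Dict.mk [])).items

-- ===== PORT B =====
-- norm_graph = {k: [normalize(v) for v in vs] for k, vs in skill_graph.items()}
def pvNG (sg : List (String × List String)) : PySem.Dict String (List String) :=
  PySem.Dict.mk (sg.map (fun p => (p.1, p.2.map (fun w => pvNorm w))))

-- levels(frontier, seen, depth): the flat [(node, hop)] list of this and all deeper levels
def pvLevels (ng : PySem.Dict String (List String)) (md : Int) (frontier : List String)
    (seen : PySem.Set String) (d : Int) : List (String × Int) :=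
  if hstop : md < d ∨ frontier = [] then []
  else
    let new := frontier.foldl (fun acc node =>
      (ng.getD node []).foldl
        (fun acc2 x => if seen.contains x || acc2.contains x then acc2 else acc2 ++ [x]) acc) []
    new.map (fun x => (x, d)) ++ pvLevels ng md new (PySem.Set.union seen new) (d + 1)
termination_by (md + 1 - d).toNat
decreasing_by
  rcases not_or.mp hstop with ⟨h1, _⟩
  omega

def get_related_multi_hop_alt (skill : String) (skill_graph : List (String × List String))
    (max_depth : Int) : List (String × Int) :=
  (PySem.Dict.ofList
    (pvLevels (pvNG skill_graph) max_depth [pvNorm skill] PySem.Set.empty 1)).items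

-- ===== PRECONDITION & SPEC =====
def Spec_get_related_multi_hop (skill : String) (skill_graph : List (String × List String)) (max_depth : Int) (out : List (String × Int)) : Prop := out = get_related_multi_hop_alt skill skill_graph max_depth
instance (skill : String) (skill_graph : List (String × List String)) (max_depth : Int) (out : List (String × Int)) : Decidable (Spec_get_related_multi_hop skill skill_graph max_depth out) := by unfold Spec_get_related_multi_hop; infer_instance

-- ===== CLAIM (what is proved, stated in full; the proofs are below) =====
def Claim_equal_get_related_multi_hop : Prop := ∀ (skill : String) (skill_graph : List (String × List String)) (max_depth : Int), Dom_get_related_multi_hop skill skill_graph max_depth → Spec_get_related_multi_hop skill skill_graph max_depth (get_related_multi_hop skill skill_graph max_depth)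

-- ===== LEMMAS AND PROOFS =====

-- norm_graph.get(node, []) is the normalization of skill_graph.get(node, [])
theorem pvNG_get (sg : List (String × List String)) (node : String) :
    (pvNG sg).getD node [] = (pvGet sg node).map pvNorm := by
  unfold pvNG pvGet PySem.Dict.getD PySem.Dict.get?
  induction sg with
  | nil => simp
  | cons p t ih =>
    by_cases hp : p.1 == node
    · simp [List.find?, hp]
    · simp only [List.map_cons, List.find?]
      simp only [hp]
      exact ih

-- intermediate: the level-synchronized form of A's loop (proof-only; state (visited, hop_dict, next))
def pvStepB (hv : Int) (st : PySem.Set String × PySem.Dict String Int × List String)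
    (nei : String) : PySem.Set String × PySem.Dict String Int × List String :=
  if st.1.contains (pvNorm nei) then st
  else (st.1.add (pvNorm nei), st.2.1.insert (pvNorm nei) hv, st.2.2 ++ [pvNorm nei])

def pvLoopB (sg : List (String × List String)) (v : PySem.Set String)
    (h : PySem.Dict String Int) (frontier : List String) (d : Int) :
    Nat → PySem.Dict String Int
  | 0 => h
  | Nat.succ k =>
    if frontier.isEmpty then h
    else
      let st := frontier.foldl (fun st node => (pvGet sg node).foldl (pvStepB (d + 1)) st)
        (v, h, ([] : List String))
      pvLoopB sg st.1 st.2.1 st.2.2 (d + 1) k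

-- if every queued depth is ≥ md, A's loop only discards and returns h
theorem pvLoopA_skipAll (sg : List (String × List String)) (md : Int) :
    ∀ (q : List (String × Int)) (v : PySem.Set String) (h : PySem.Dict String Int),
      (∀ p ∈ q, md ≤ p.2) → pvLoopA sg md v q h = h := by
  intro q
  induction q with
  | nil => intro v h _; rw [pvLoopA]
  | cons p rest ih =>
    intro v h hall
    obtain ⟨node, depth⟩ := p
    have hd : md ≤ depth := hall _ (List.mem_cons_self ..)
    rw [pvLoopA]
    simp only [hd, if_pos]
    exact ih v h (fun p hp => hall p (List.mem_cons_of_mem _ hp))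

theorem pvStepB_skip (hv : Int) (v : PySem.Set String) (h : PySem.Dict String Int)
    (nx : List String) (x : String) (hc : v.contains (pvNorm x) = true) :
    pvStepB hv (v, h, nx) x = (v, h, nx) := by
  have hm : pvNorm x ∈ v := by simpa [PySem.Set.contains] using hc
  simp [pvStepB, hm]

theorem pvStepB_new (hv : Int) (v : PySem.Set String) (h : PySem.Dict String Int)
    (nx : List String) (x : String) (hc : v.contains (pvNorm x) = false) :
    pvStepB hv (v, h, nx) x = (v.add (pvNorm x), h.insert (pvNorm x) hv, nx ++ [pvNorm x]) := by
  have hm : pvNorm x ∉ v := by simpa [PySem.Set.contains] using hc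
  simp [pvStepB, hm]

-- one node's neighbour fold: A's queue form vs the level form
theorem pvFoldAB (d : Int) :
    ∀ (neis : List String) (v : PySem.Set String) (h : PySem.Dict String Int)
      (pre : List (String × Int)) (next : List String),
      neis.foldl (pvStepA d) (v, h, pre ++ next.map (fun s => (s, d + 1)))
        = ((neis.foldl (pvStepB (d + 1)) (v, h, next)).1,
           (neis.foldl (pvStepB (d + 1)) (v, h, next)).2.1,
           pre ++ ((neis.foldl (pvStepB (d + 1)) (v, h, next)).2.2).map (fun s => (s, d + 1))) := by
  intro neis
  induction neis with
  | nil => intro v h pre next; simp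
  | cons x t ih =>
    intro v h pre next
    simp only [List.foldl_cons]
    rcases hc : (v.contains (pvNorm x)) with _ | _
    · rw [pvStepA_new d v h (pre ++ next.map (fun s => (s, d + 1))) x hc,
        pvStepB_new (d + 1) v h next x hc]
      have := ih (v.add (pvNorm x)) (h.insert (pvNorm x) (d + 1)) pre (next ++ [pvNorm x])
      simpa [List.map_append, List.append_assoc] using this
    · rw [pvStepA_skip d v h (pre ++ next.map (fun s => (s, d + 1))) x hc,
        pvStepB_skip (d + 1) v h next x hc]
      exact ih v h pre next

-- the value A's loop computes from a split queue, phrased in level terms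
def pvRHS (sg : List (String × List String)) (md : Int) (d : Int)
    (rest next : List String) (v : PySem.Set String) (h : PySem.Dict String Int) :
    PySem.Dict String Int :=
  if md ≤ d then h
  else
    let st := rest.foldl (fun st node => (pvGet sg node).foldl (pvStepB (d + 1)) st) (v, h, next)
    pvLoopB sg st.1 st.2.1 st.2.2 (d + 1) (md - (d + 1)).toNat

theorem pvRHS_eq_loopB (sg : List (String × List String)) (md : Int) (d : Int)
    (f : List String) (v : PySem.Set String) (h : PySem.Dict String Int) :
    pvRHS sg md d f [] v h = pvLoopB sg v h f d (md - d).toNat := by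
  unfold pvRHS
  by_cases hmd : md ≤ d
  · have : (md - d).toNat = 0 := by omega
    simp [hmd, this, pvLoopB]
  · have hk : ∃ k, (md - d).toNat = k + 1 := ⟨(md - d).toNat - 1, by omega⟩
    obtain ⟨k, hk⟩ := hk
    rw [hk]
    simp only [hmd, pvLoopB]
    by_cases hf : f.isEmpty
    · have : f = [] := List.isEmpty_iff.mp hf
      subst this
      cases hkz : (md - (d + 1)).toNat <;> simp [pvLoopB]
    · have hkk : (md - (d + 1)).toNat = k := by omega
      simp [hf, hkk]

theorem pvMain (sg : List (String × List String)) (md : Int) :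
    ∀ (k : Nat) (d : Int), (md - d).toNat = k →
    ∀ (rest next : List String) (v : PySem.Set String) (h : PySem.Dict String Int),
      pvLoopA sg md v (rest.map (fun s => (s, d)) ++ next.map (fun s => (s, d + 1))) h
        = pvRHS sg md d rest next v h := by
  intro k
  induction k using Nat.strong_induction_on with
  | _ k ihk =>
    intro d hd rest
    induction rest with
    | nil =>
      intro next v h
      by_cases hmd : md ≤ d
      · rw [pvLoopA_skipAll]
        · simp [pvRHS, hmd]
        · intro p hp
          simp only [List.map_nil, List.nil_append, List.mem_map] at hp
          obtain ⟨s, _, rfl⟩ := hp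
          simpa using by omega
      · have hnext : next.map (fun s => (s, d + 1))
            = next.map (fun s => (s, d + 1)) ++ ([] : List String).map (fun s => (s, d + 1 + 1)) := by
          simp
        have hk' : (md - (d + 1)).toNat < k := by omega
        have := ihk (md - (d + 1)).toNat hk' (d + 1) rfl next [] v h
        simp only [List.map_nil, List.nil_append]
        rw [hnext, this, pvRHS_eq_loopB]
        simp [pvRHS, hmd]
    | cons node rest' ihr =>
      intro next v h
      by_cases hmd : md ≤ d
      · rw [pvLoopA_skipAll]
        · simp [pvRHS, hmd]
        · intro p hp
          simp only [List.map_cons, List.cons_append, List.mem_cons, List.mem_append,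
            List.mem_map] at hp
          rcases hp with rfl | hp
          · simpa using hmd
          · rcases hp with ⟨s, _, rfl⟩ | ⟨s, _, rfl⟩ <;> simpa using by omega
      · simp only [List.map_cons, List.cons_append]
        rw [pvLoopA]
        simp only [hmd, if_false]
        rw [pvFoldAB]
        rw [ihr ((pvGet sg node).foldl (pvStepB (d + 1)) (v, h, next)).2.2
          ((pvGet sg node).foldl (pvStepB (d + 1)) (v, h, next)).1
          ((pvGet sg node).foldl (pvStepB (d + 1)) (v, h, next)).2.1]
        simp [pvRHS, hmd]

-- the pure in-level step B uses (seen fixed, accumulator = this level's new nodes)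
def pvLvlStep (v0 : PySem.Set String) (a : List String) (x : String) : List String :=
  if v0.contains x || a.contains x then a else a ++ [x]

-- one node's neighbour fold: the (visited, hop_dict, new) form vs the pure new-list form
theorem pvLevelFold (hv : Int) (v0 : PySem.Set String) (ys : List String) :
    ∀ (acc : List String) (h : PySem.Dict String Int),
      (∀ x, h.contains x = true → x ∈ v0 ∨ x ∈ acc) → acc.Nodup → (∀ x ∈ acc, x ∉ v0) →
      ∃ r, ys.foldl (fun a y => pvLvlStep v0 a (pvNorm y)) acc = acc ++ r ∧
        ys.foldl (pvStepB hv) (v0 ++ acc, h, acc)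
          = (v0 ++ (acc ++ r), PySem.Dict.mk (h.items ++ r.map (fun s => (s, hv))), acc ++ r) ∧
        (acc ++ r).Nodup ∧ (∀ x ∈ acc ++ r, x ∉ v0) := by
  induction ys with
  | nil =>
    intro acc h hk hnd hdj
    exact ⟨[], by simp, by simp, by simpa using hnd, by simpa using hdj⟩
  | cons y t ih =>
    intro acc h hk hnd hdj
    simp only [List.foldl_cons]
    by_cases hb : (PySem.Set.contains v0 (pvNorm y) || List.contains acc (pvNorm y)) = true
    · -- already seen (in v0 or in this level's acc): both sides skip
      have hc : PySem.Set.contains (v0 ++ acc) (pvNorm y) = true := by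
        simp only [PySem.Set.contains_eq_listContains, List.contains_append] at hb ⊢
        exact hb
      rw [pvStepB_skip hv (v0 ++ acc) h acc y hc]
      have hstep : pvLvlStep v0 acc (pvNorm y) = acc := by
        unfold pvLvlStep
        rw [hb]
        simp
      rw [hstep]
      exact ih acc h hk hnd hdj
    · -- fresh node: both sides append it
      have hb' : (PySem.Set.contains v0 (pvNorm y) || List.contains acc (pvNorm y)) = false :=
        Bool.eq_false_iff.mpr hb
      obtain ⟨hv0, hacc⟩ := Bool.or_eq_false_iff.mp hb'
      have hnm_acc : pvNorm y ∉ acc := by simpa using hacc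
      have hnm_v0 : pvNorm y ∉ v0 := by
        simpa [PySem.Set.contains_eq_listContains] using hv0
      have hc : PySem.Set.contains (v0 ++ acc) (pvNorm y) = false := by
        simp only [PySem.Set.contains_eq_listContains, List.contains_append]
        simp only [PySem.Set.contains_eq_listContains] at hv0
        rw [hv0, hacc]
        rfl
      rw [pvStepB_new hv (v0 ++ acc) h acc y hc]
      have hadd : PySem.Set.add (v0 ++ acc) (pvNorm y) = v0 ++ (acc ++ [pvNorm y]) := by
        unfold PySem.Set.add
        rw [hc]
        simp
      rw [hadd]
      have hstep : pvLvlStep v0 acc (pvNorm y) = acc ++ [pvNorm y] := by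
        simp only [pvLvlStep]
        rw [hv0, hacc]
        simp
      rw [hstep]
      have hhc : h.contains (pvNorm y) = false := by
        by_contra hcc
        rcases hk _ (Bool.of_not_eq_false hcc) with hmv | hma
        · exact hnm_v0 hmv
        · exact hnm_acc hma
      have hk' : ∀ x, (h.insert (pvNorm y) hv).contains x = true → x ∈ v0 ∨ x ∈ acc ++ [pvNorm y] := by
        intro x hx
        rw [PySem.Dict.contains_insert] at hx
        rcases Bool.or_eq_true_iff.mp hx with hxe | hxc
        · right; simp [eq_of_beq hxe]
        · rcases hk x hxc with hl | hr
          · exact Or.inl hl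
          · right; simp [hr]
      have hnd' : (acc ++ [pvNorm y]).Nodup := by
        refine List.Nodup.append hnd (List.nodup_singleton _) ?_
        simpa [List.disjoint_singleton] using hnm_acc
      have hdj' : ∀ x ∈ acc ++ [pvNorm y], x ∉ v0 := by
        intro x hx
        rcases List.mem_append.mp hx with hx | hx
        · exact hdj x hx
        · simp only [List.mem_singleton] at hx
          subst hx
          exact hnm_v0
      obtain ⟨r', e1, e2, e3, e4⟩ := ih (acc ++ [pvNorm y]) (h.insert (pvNorm y) hv) hk' hnd' hdj'
      refine ⟨pvNorm y :: r', ?_, ?_, ?_, ?_⟩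
      · rw [e1]; simp
      · rw [e2, PySem.Dict.items_insert_of_not_contains h hv hhc]
        simp
      · simpa [List.append_assoc] using e3
      · intro x hx
        apply e4
        simpa [List.append_assoc] using hx

-- a whole level: the frontier fold of the (visited, hop_dict, new) form vs pvLevels' new list
theorem pvFrontierFold (hv : Int) (v0 : PySem.Set String) (sg : List (String × List String))
    (nodes : List String) :
    ∀ (acc : List String) (h : PySem.Dict String Int),
      (∀ x, h.contains x = true → x ∈ v0 ∨ x ∈ acc) → acc.Nodup → (∀ x ∈ acc, x ∉ v0) →
      ∃ r, nodes.foldl (fun a node => ((pvNG sg).getD node []).foldl (pvLvlStep v0) a) acc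
            = acc ++ r ∧
        nodes.foldl (fun st node => (pvGet sg node).foldl (pvStepB hv) st) (v0 ++ acc, h, acc)
          = (v0 ++ (acc ++ r), PySem.Dict.mk (h.items ++ r.map (fun s => (s, hv))), acc ++ r) ∧
        (acc ++ r).Nodup ∧ (∀ x ∈ acc ++ r, x ∉ v0) := by
  induction nodes with
  | nil =>
    intro acc h hk hnd hdj
    exact ⟨[], by simp, by simp, by simpa using hnd, by simpa using hdj⟩
  | cons node tn ih =>
    intro acc h hk hnd hdj
    simp only [List.foldl_cons]
    have hpure : ((pvNG sg).getD node []).foldl (pvLvlStep v0) acc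
        = (pvGet sg node).foldl (fun a y => pvLvlStep v0 a (pvNorm y)) acc := by
      rw [pvNG_get, List.foldl_map]
    rw [hpure]
    obtain ⟨r1, e1, e2, e3, e4⟩ := pvLevelFold hv v0 (pvGet sg node) acc h hk hnd hdj
    rw [e1, e2]
    have hk' : ∀ x, (PySem.Dict.mk (h.items ++ r1.map (fun s => (s, hv)))).contains x = true
        → x ∈ v0 ∨ x ∈ acc ++ r1 := by
      intro x hx
      have hxk := (PySem.Dict.contains_iff_mem_keys _ _).mp hx
      simp only [PySem.Dict.keys, List.map_append, List.map_map, List.mem_append] at hxk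
      rcases hxk with hxk | hxk
      · rcases hk x (((PySem.Dict.contains_iff_mem_keys _ _).mpr hxk)) with hl | hr
        · exact Or.inl hl
        · exact Or.inr (List.mem_append.mpr (Or.inl hr))
      · right
        apply List.mem_append.mpr
        right
        simpa using hxk
    obtain ⟨r2, f1, f2, f3, f4⟩ := ih (acc ++ r1) (PySem.Dict.mk (h.items ++ r1.map (fun s => (s, hv)))) hk' e3 e4
    refine ⟨r1 ++ r2, ?_, ?_, ?_, ?_⟩
    · rw [f1]; simp
    · rw [f2]; simp
    · simpa [List.append_assoc] using f3
    · intro x hx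
      apply f4
      simpa [List.append_assoc] using hx

-- pvLoopB's result is the start dict followed by the flat level pairs
theorem pvLoopB_items (sg : List (String × List String)) :
    ∀ (k : Nat) (d : Int) (v : PySem.Set String) (h : PySem.Dict String Int) (f : List String),
      (∀ x, h.contains x = true → x ∈ v) →
      (pvLoopB sg v h f d k).items
        = h.items ++ pvLevels (pvNG sg) (d + k) f v (d + 1) := by
  intro k
  induction k with
  | zero =>
    intro d v h f hk
    rw [pvLevels]
    rw [dif_pos (Or.inl (by push_cast; omega))]
    simp [pvLoopB]
  | succ k ih =>
    intro d v h f hk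
    by_cases hf : f = []
    · subst hf
      rw [pvLevels]
      rw [dif_pos (Or.inr rfl)]
      simp [pvLoopB]
    · rw [pvLoopB]
      have hfe : f.isEmpty = false := by simpa [List.isEmpty_iff] using hf
      simp only [hfe, Bool.false_eq_true, if_false]
      have hk0 : ∀ x, h.contains x = true → x ∈ v ∨ x ∈ ([] : List String) :=
        fun x hx => Or.inl (hk x hx)
      obtain ⟨r, e1, e2, e3, e4⟩ :=
        pvFrontierFold (d + 1) v sg f [] h hk0 List.nodup_nil (by simp)
      have hst : f.foldl (fun st node => (pvGet sg node).foldl (pvStepB (d + 1)) st)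
            (v, h, ([] : List String))
          = (v ++ r, PySem.Dict.mk (h.items ++ r.map (fun s => (s, d + 1))), r) := by
        simpa using e2
      rw [hst]
      have hk' : ∀ x, (PySem.Dict.mk (h.items ++ r.map (fun s => (s, d + 1)))).contains x = true
          → x ∈ v ++ r := by
        intro x hx
        have hxk := (PySem.Dict.contains_iff_mem_keys _ _).mp hx
        simp only [PySem.Dict.keys, List.map_append, List.map_map, List.mem_append] at hxk
        rcases hxk with hxk | hxk
        · exact List.mem_append.mpr (Or.inl (hk x ((PySem.Dict.contains_iff_mem_keys _ _).mpr hxk)))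
        · apply List.mem_append.mpr
          right
          simpa using hxk
      have e1' : f.foldl (fun acc node =>
            ((pvNG sg).getD node []).foldl
              (fun acc2 x => if v.contains x || acc2.contains x then acc2 else acc2 ++ [x]) acc)
            ([] : List String) = r := by
        unfold pvLvlStep at e1
        simpa using e1
      have hun : PySem.Set.union v r = v ++ r := by
        unfold PySem.Set.union
        exact PySem.Set.update_eq_append_of_disjoint v r (by simpa using e3)
          (fun x hx => e4 x (by simpa using hx))
      have hcond : ¬((d + ((k + 1 : Nat) : Int) < d + 1) ∨ f = []) := by
        rintro (hlt | hnil)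
        · push_cast at hlt; omega
        · exact hf hnil
      -- unfold one level of pvLevels on the right-hand side
      conv_rhs => rw [pvLevels]
      rw [dif_neg hcond]
      simp only [e1', hun]
      rw [ih (d + 1) (v ++ r) _ r hk']
      have hmd : (d + 1) + (k : Int) = d + ((k : Nat) + 1 : Nat) := by push_cast; ring
      rw [hmd]
      simp [List.append_assoc]

-- keys stay unique through the loops
theorem pvFoldB_nodup (hv : Int) (ys : List String) :
    ∀ (st : PySem.Set String × PySem.Dict String Int × List String),
      st.2.1.keys.Nodup → ((ys.foldl (pvStepB hv) st).2.1).keys.Nodup := by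
  induction ys with
  | nil => intro st hst; exact hst
  | cons y t ih =>
    intro st hst
    simp only [List.foldl_cons]
    apply ih
    unfold pvStepB
    split
    · exact hst
    · exact PySem.Dict.nodup_keys_insert _ _ _ hst

theorem pvLoopB_nodup (sg : List (String × List String)) :
    ∀ (k : Nat) (d : Int) (v : PySem.Set String) (h : PySem.Dict String Int) (f : List String),
      h.keys.Nodup → (pvLoopB sg v h f d k).keys.Nodup := by
  intro k
  induction k with
  | zero => intro d v h f hh; exact hh
  | succ k ih =>
    intro d v h f hh
    rw [pvLoopB]
    by_cases hf : f.isEmpty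
    · simp [hf, hh]
    · simp only [hf, Bool.false_eq_true, if_false]
      apply ih
      have : ∀ (nodes : List String) (st : PySem.Set String × PySem.Dict String Int × List String),
          st.2.1.keys.Nodup →
          ((nodes.foldl (fun st node => (pvGet sg node).foldl (pvStepB (d + 1)) st) st)).2.1.keys.Nodup := by
        intro nodes
        induction nodes with
        | nil => intro st hst; exact hst
        | cons n t iht =>
          intro st hst
          simp only [List.foldl_cons]
          exact iht _ (pvFoldB_nodup (d + 1) (pvGet sg n) st hst)
      exact this f (v, h, []) hh

-- dict(pairs) with distinct keys keeps the pair list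
theorem pvOfList_items (l : List (String × Int)) (h : (l.map (fun p => p.1)).Nodup) :
    (PySem.Dict.ofList l).items = l := by
  unfold PySem.Dict.ofList PySem.Dict.update
  rw [PySem.Dict.items_foldl_insert_fresh l (fun p => p.1) (fun p => p.2) PySem.Dict.empty
    (fun a _ => by simp [pysem]) h]
  simp [PySem.Dict.empty]

-- ===== VERDICT (by name: the statement is the Claim_ definition above) =====
theorem get_related_multi_hop_spec : Claim_equal_get_related_multi_hop := by
  intro skill sg md _
  unfold Spec_get_related_multi_hop get_related_multi_hop get_related_multi_hop_alt
  have h0 : ([(pvNorm skill, 0)] : List (String × Int))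
      = [pvNorm skill].map (fun s => (s, (0 : Int)))
        ++ ([] : List String).map (fun s => (s, (0 : Int) + 1)) := by
    simp
  rw [h0, pvMain sg md md.toNat 0 (by omega) [pvNorm skill] [] PySem.Set.empty (PySem.Dict.mk []),
    pvRHS_eq_loopB]
  have hempty : ∀ x, (PySem.Dict.mk ([] : List (String × Int))).contains x = true
      → x ∈ (PySem.Set.empty : PySem.Set String) := by
    intro x hx
    simp [PySem.Dict.contains] at hx
  rw [pvLoopB_items sg (md - 0).toNat 0 PySem.Set.empty (PySem.Dict.mk []) [pvNorm skill] hempty]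
  by_cases hmd : 0 ≤ md
  · have hcast : (0 : Int) + (((md - 0).toNat : Nat) : Int) = md := by omega
    rw [hcast]
    have hpairs : pvLevels (pvNG sg) md [pvNorm skill] PySem.Set.empty (0 + 1)
        = (pvLoopB sg PySem.Set.empty (PySem.Dict.mk []) [pvNorm skill] 0 (md - 0).toNat).items := by
      rw [pvLoopB_items sg (md - 0).toNat 0 PySem.Set.empty (PySem.Dict.mk []) [pvNorm skill] hempty,
        hcast]
      simp
    have hnd : ((pvLevels (pvNG sg) md [pvNorm skill] PySem.Set.empty (0 + 1)).map
        (fun p => p.1)).Nodup := by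
      rw [hpairs]
      have := pvLoopB_nodup sg (md - 0).toNat 0 PySem.Set.empty (PySem.Dict.mk [])
        [pvNorm skill] (by simp [PySem.Dict.keys])
      simpa [PySem.Dict.keys] using this
    have hnd' : ((pvLevels (pvNG sg) md [pvNorm skill] PySem.Set.empty 1).map
        (fun p => p.1)).Nodup := by
      simpa using hnd
    rw [pvOfList_items _ hnd']
    simp
  · have hz : ((md - 0).toNat : Int) = 0 := by omega
    have hA : pvLevels (pvNG sg) (0 + (((md - 0).toNat : Nat) : Int)) [pvNorm skill]
        PySem.Set.empty (0 + 1) = [] := by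
      rw [pvLevels]
      rw [dif_pos (Or.inl (by rw [hz]; norm_num))]
    have hB : pvLevels (pvNG sg) md [pvNorm skill] PySem.Set.empty 1 = [] := by
      rw [pvLevels]
      rw [dif_pos (Or.inl (by omega))]
    rw [hA, hB]
    simp [PySem.Dict.ofList, PySem.Dict.update, PySem.Dict.empty]
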